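-- pv_equiv track=rewrite | github.com/kimyoungjin06/aoe_orch_control | scripts/gateway/aoe_tg_management_handlers.py | _parse_replace_sync_flag
-- ===== SOURCE A (Python) =====
-- from typing import Any, Callable, Dict, List, Optional, Tuple
--
-- def _parse_replace_sync_flag(tokens: List[str]) -> Optional[bool]:
--     result: Optional[bool] = None
--     for tok in tokens:
--         low = str(tok or "").strip().lower()
--         if low in {"replace-sync", "sync-replace", "replace_prefetch", "prefetch-replace"}:
--             result = True
--         elif low in {"no-replace-sync", "safe-sync", "no-sync-replace"}:
--             result = False
--     return result
-- ===== SOURCE B (Python) =====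
-- _TRUE_FLAGS = {"replace-sync", "sync-replace", "replace_prefetch", "prefetch-replace"}
-- _FALSE_FLAGS = {"no-replace-sync", "safe-sync", "no-sync-replace"}
--
-- def _parse_replace_sync_flag(tokens):
--     # Scan from the end and return on the first hit: the last forward match
--     # (A's last-wins accumulator) is the first match seen in reverse.
--     for tok in reversed(tokens):
--         low = str(tok or "").strip().lower()
--         if low in _TRUE_FLAGS:
--             return True
--         if low in _FALSE_FLAGS:
--             return False
--     return None
-- ===== Notes on version B (the rewrite author's own statement) =====
-- stated objective: alternative
-- what changed: Replaces the forward scan with a last-wins Optional accumulator by a reverse scan that returns immediately on the first matching token (first reverse match = last forward match), so no accumulator is maintained and the loop stops early.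
import Mathlib
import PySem

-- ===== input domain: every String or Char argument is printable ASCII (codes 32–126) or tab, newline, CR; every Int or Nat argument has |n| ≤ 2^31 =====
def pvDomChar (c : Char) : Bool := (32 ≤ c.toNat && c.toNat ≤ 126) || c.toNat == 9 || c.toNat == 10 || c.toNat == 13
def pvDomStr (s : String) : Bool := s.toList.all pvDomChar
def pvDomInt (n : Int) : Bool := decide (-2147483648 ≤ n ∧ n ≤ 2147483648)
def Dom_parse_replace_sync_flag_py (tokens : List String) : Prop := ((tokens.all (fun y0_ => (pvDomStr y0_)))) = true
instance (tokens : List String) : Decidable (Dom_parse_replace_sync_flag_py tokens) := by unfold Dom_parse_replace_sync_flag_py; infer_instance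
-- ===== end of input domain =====

-- B replaces A's forward last-wins accumulator scan by a reverse scan returning on the first match (alternative decomposition, same cost).


-- ===== PORT A =====
def pvTrueFlags : List String := ["replace-sync", "sync-replace", "replace_prefetch", "prefetch-replace"]
def pvFalseFlags : List String := ["no-replace-sync", "safe-sync", "no-sync-replace"]

-- forward loop, last-wins accumulator ('tok or ""' ported exactly: empty string is falsy)
def parse_replace_sync_flag_py (tokens : List String) : Option Bool :=
  tokens.foldl (fun result tok =>
    let low := PySem.Str.lower (PySem.Str.strip (if tok == "" then "" else tok))
    if low ∈ pvTrueFlags then some true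
    else if low ∈ pvFalseFlags then some false
    else result) none

-- ===== PORT B =====
-- reverse scan with early return (transliteration of Source B's 'for tok in reversed(tokens)')
def pvRevScan : List String → Option Bool
  | [] => none
  | tok :: rest =>
    let low := PySem.Str.lower (PySem.Str.strip (if tok == "" then "" else tok))
    if low ∈ pvTrueFlags then some true
    else if low ∈ pvFalseFlags then some false
    else pvRevScan rest

def parse_replace_sync_flag_py_alt (tokens : List String) : Option Bool :=
  pvRevScan tokens.reverse

-- ===== PRECONDITION & SPEC =====
def Spec_parse_replace_sync_flag_py (tokens : List String) (out : Option Bool) : Prop := out = parse_replace_sync_flag_py_alt tokens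
instance (tokens : List String) (out : Option Bool) : Decidable (Spec_parse_replace_sync_flag_py tokens out) := by unfold Spec_parse_replace_sync_flag_py; infer_instance

-- ===== CLAIM (what is proved, stated in full; the proofs are below) =====
def Claim_equal_parse_replace_sync_flag_py : Prop := ∀ (tokens : List String), Dom_parse_replace_sync_flag_py tokens → Spec_parse_replace_sync_flag_py tokens (parse_replace_sync_flag_py tokens)

-- ===== LEMMAS AND PROOFS =====
-- scanning a concatenation: first match of the left part wins
theorem pvRevScan_append (xs ys : List String) :
    pvRevScan (xs ++ ys) = (pvRevScan xs).or (pvRevScan ys) := by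
  induction xs with
  | nil => simp [pvRevScan]
  | cons t rest ih =>
    simp only [List.cons_append, pvRevScan]
    split_ifs <;> simp [ih]

-- A's foldl from accumulator acc equals the reverse scan, falling back to acc
theorem pvFoldl_eq_revScan (xs : List String) (acc : Option Bool) :
    xs.foldl (fun result tok =>
      let low := PySem.Str.lower (PySem.Str.strip (if tok == "" then "" else tok))
      if low ∈ pvTrueFlags then some true
      else if low ∈ pvFalseFlags then some false
      else result) acc = (pvRevScan xs.reverse).or acc := by
  induction xs generalizing acc with
  | nil => simp [pvRevScan]
  | cons t rest ih =>
    simp only [List.foldl_cons, List.reverse_cons]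
    rw [ih, pvRevScan_append]
    cases h : pvRevScan rest.reverse with
    | some b => simp [Option.or]
    | none =>
      simp only [Option.or, pvRevScan]
      split_ifs <;> rfl

-- ===== VERDICT (by name: the statement is the Claim_ definition above) =====
theorem parse_replace_sync_flag_py_spec : Claim_equal_parse_replace_sync_flag_py := by
  intro tokens _
  unfold Spec_parse_replace_sync_flag_py parse_replace_sync_flag_py parse_replace_sync_flag_py_alt
  rw [pvFoldl_eq_revScan]
  cases pvRevScan tokens.reverse <;> rfl
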